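-- pv_equiv track=rewrite | github.com/AsterismH/worstcase-offloading | auxiliary.py | notInSet
-- ===== SOURCE A (Python) =====
-- def notInSet(task, queue):
--     taskSet = set()
--     for i in queue:
--         for j in i:
--             taskSet.add(j)
--     if task in taskSet:
--         return 0
--     else:
--         return 1
-- ===== SOURCE B (Python) =====
-- def notInSet(task, queue):
--     for i in queue:
--         if task in i:
--             return 0
--     return 1
-- ===== Notes on version B (the rewrite author's own statement) =====
-- stated objective: simpler
-- what changed: B drops the up-front construction of the flattened set and instead scans the sub-lists directly, returning 0 on the first sub-list containing the task (early exit, no container maintained).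
import Mathlib
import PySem

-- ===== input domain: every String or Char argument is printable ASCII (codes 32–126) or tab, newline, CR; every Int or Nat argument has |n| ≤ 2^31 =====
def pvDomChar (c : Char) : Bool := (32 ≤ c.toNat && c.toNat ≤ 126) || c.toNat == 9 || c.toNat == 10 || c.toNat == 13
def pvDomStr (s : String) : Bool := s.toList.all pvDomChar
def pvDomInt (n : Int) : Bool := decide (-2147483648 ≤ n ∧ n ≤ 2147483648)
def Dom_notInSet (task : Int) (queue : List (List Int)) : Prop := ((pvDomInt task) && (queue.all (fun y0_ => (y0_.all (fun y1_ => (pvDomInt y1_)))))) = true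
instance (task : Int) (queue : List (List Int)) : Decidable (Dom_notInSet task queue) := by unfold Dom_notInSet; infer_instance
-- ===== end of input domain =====

-- B replaces A's build-flattened-set-then-test with a direct early-exit scan over the sub-lists (simpler, no container).


-- ===== PORT A =====
def notInSet (task : Int) (queue : List (List Int)) : Int :=
  let taskSet : PySem.Set Int :=
    queue.foldl (fun s i => i.foldl (fun s j => PySem.Set.add s j) s) PySem.Set.empty
  if task ∈ taskSet then 0 else 1

-- ===== PORT B =====
def notInSet_alt (task : Int) (queue : List (List Int)) : Int :=
  match queue with
  | [] => 1
  | i :: rest => if task ∈ i then 0 else notInSet_alt task rest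

-- ===== PRECONDITION & SPEC =====
def Spec_notInSet (task : Int) (queue : List (List Int)) (out : Int) : Prop := out = notInSet_alt task queue
instance (task : Int) (queue : List (List Int)) (out : Int) : Decidable (Spec_notInSet task queue out) := by unfold Spec_notInSet; infer_instance

-- ===== CLAIM (what is proved, stated in full; the proofs are below) =====
def Claim_equal_notInSet : Prop := ∀ (task : Int) (queue : List (List Int)), Dom_notInSet task queue → Spec_notInSet task queue (notInSet task queue)

-- ===== LEMMAS AND PROOFS =====

theorem mem_foldl_update (task : Int) (queue : List (List Int)) (s : PySem.Set Int) :
    (task ∈ queue.foldl (fun s i => i.foldl (fun s j => PySem.Set.add s j) s) s) ↔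
      task ∈ s ∨ ∃ i ∈ queue, task ∈ i := by
  induction queue generalizing s with
  | nil => simp
  | cons i rest ih =>
    have hinner : ∀ (l : List Int) (t : PySem.Set Int),
        (task ∈ l.foldl (fun s j => PySem.Set.add s j) t) ↔ task ∈ t ∨ task ∈ l := by
      intro l
      induction l with
      | nil => simp
      | cons j l' ihl =>
        intro t
        simp [List.foldl, ihl, PySem.Set.mem_add]
        tauto
    simp only [List.foldl, ih, hinner]
    simp
    tauto

theorem notInSet_alt_eq (task : Int) (queue : List (List Int)) :
    notInSet_alt task queue = if (∃ i ∈ queue, task ∈ i) then 0 else 1 := by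
  induction queue with
  | nil => simp [notInSet_alt]
  | cons i rest ih =>
    by_cases h : task ∈ i
    · simp [notInSet_alt, h]
    · simp only [notInSet_alt, if_neg h, ih]
      have hiff : (∃ j ∈ i :: rest, task ∈ j) ↔ ∃ j ∈ rest, task ∈ j := by
        constructor
        · rintro ⟨j, hj, hm⟩
          rcases List.mem_cons.1 hj with rfl | hj'
          · exact absurd hm h
          · exact ⟨j, hj', hm⟩
        · rintro ⟨j, hj, hm⟩
          exact ⟨j, List.mem_cons_of_mem _ hj, hm⟩
      rw [if_congr hiff rfl rfl]

-- ===== VERDICT (by name: the statement is the Claim_ definition above) =====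
theorem notInSet_spec : Claim_equal_notInSet := by
  intro task queue _
  unfold Spec_notInSet notInSet
  rw [notInSet_alt_eq]
  simp only []
  by_cases h : ∃ i ∈ queue, task ∈ i
  · rw [if_pos h, if_pos ((mem_foldl_update task queue PySem.Set.empty).2 (Or.inr h))]
  · rw [if_neg h, if_neg (fun hm => by
      rcases (mem_foldl_update task queue PySem.Set.empty).1 hm with h' | h'
      · simp [PySem.Set.empty] at h'
      · exact h h')]
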